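-- pv_equiv track=rewrite | github.com/GhoulzSebas/Proyecto-Final | Proyecto Final Programacion.py | calcular_puntos_de_seguridad
-- ===== SOURCE A (Python) =====
-- def calcular_puntos_de_seguridad(patterns, passwords):
--
--     minusculas = ["a","b","c","d","e","f","g","h","i","j","k","l","m","n","ñ","o","p","q","r","s","t","u","v","w","x","y","z"]
--     mayusculas = ["A","B","C","D","E","F","G","H","I","J","K","L","M","N","Ñ","O","P","Q","R","S","T","U","V","W","X","Y","Z"]
--     numeros = ["0","1","2","3","4","5","6","7","8","9"]
--     puntos_de_seguridad = 0
--     puntos_de_seguridad_arr = []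
--
--     for i in passwords:
--         puntos_de_seguridad = 0
--         ciclo_minusculas = 0
--         ciclo_mayusculas = 0
--         ciclo_numeros = 0
--         ciclo_caracteres_especiales = 0
--
--         for k in i:
--             if k in minusculas:
--                 if ciclo_minusculas == 0:
--
--                     puntos_de_seguridad += 1
--                     ciclo_minusculas = 1
--                     continue
--                 else:
--                     continue
--             elif k in mayusculas:
--                 if ciclo_mayusculas == 0:
--                     puntos_de_seguridad += 1
--                     ciclo_mayusculas = 1
--                     continue
--                 else:
--                     continue
--
--             elif k in numeros:
--                 if ciclo_numeros == 0:
--                     puntos_de_seguridad += 1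
--                     ciclo_numeros = 1
--                     continue
--             else:
--                 if ciclo_caracteres_especiales == 0:
--                     puntos_de_seguridad += 3
--                     ciclo_caracteres_especiales = 1
--                     continue
--                 else:
--                     puntos_de_seguridad += 2
--                     continue
--
--         for patron_obvio in patterns:
--             for caracter in range(len(i)):
--                 subcadena = ""
--                 for j in range(caracter,len(i)):
--                     subcadena += i[j]
--                     if subcadena == patron_obvio:
--                         puntos_de_seguridad -= 5
--
--
--         puntos_de_seguridad_arr += [puntos_de_seguridad + len(i)]
--
--     return puntos_de_seguridad_arr
-- ===== SOURCE B (Python) =====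
-- def calcular_puntos_de_seguridad(patterns, passwords):
--     res = []
--     for pw in passwords:
--         has_lower = has_upper = has_digit = False
--         specials = 0
--         for ch in pw:
--             if "a" <= ch <= "z" or ch == "ñ":
--                 has_lower = True
--             elif "A" <= ch <= "Z" or ch == "Ñ":
--                 has_upper = True
--             elif "0" <= ch <= "9":
--                 has_digit = True
--             else:
--                 specials += 1
--         score = int(has_lower) + int(has_upper) + int(has_digit)
--         if specials > 0:
--             score += 2 * specials + 1
--         for p in patterns:
--             if not p:
--                 continue
--             start = 0
--             while True:
--                 idx = pw.find(p, start)
--                 if idx == -1: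
--                     break
--                 score -= 5
--                 start = idx + 1
--         res.append(score + len(pw))
--     return res
-- ===== Notes on version B (the rewrite author's own statement) =====
-- stated objective: faster
-- what changed: A builds every substring from every start position to count pattern occurrences (and re-scans alphabet lists per character); B counts overlapping occurrences per pattern with a str.find loop and classifies characters by range comparisons with boolean flags plus a specials counter.
import Mathlib
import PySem

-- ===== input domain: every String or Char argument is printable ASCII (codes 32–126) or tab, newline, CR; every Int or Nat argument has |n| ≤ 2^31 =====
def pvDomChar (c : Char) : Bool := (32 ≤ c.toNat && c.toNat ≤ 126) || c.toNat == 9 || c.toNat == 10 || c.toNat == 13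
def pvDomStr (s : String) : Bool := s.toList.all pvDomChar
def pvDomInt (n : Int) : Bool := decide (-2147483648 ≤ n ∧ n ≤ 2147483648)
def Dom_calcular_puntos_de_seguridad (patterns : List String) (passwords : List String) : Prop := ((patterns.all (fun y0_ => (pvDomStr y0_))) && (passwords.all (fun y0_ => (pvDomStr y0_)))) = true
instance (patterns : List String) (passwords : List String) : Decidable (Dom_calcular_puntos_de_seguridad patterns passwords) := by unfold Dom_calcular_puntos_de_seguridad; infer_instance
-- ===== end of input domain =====

-- B replaces A's build-every-substring pattern scan by an overlapping str.find loop per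
-- pattern and A's flag/score bookkeeping by a boolean/counter pass (objective: faster).

-- ===== PORT A =====
def calcular_puntos_de_seguridad (patterns : List String) (passwords : List String) : List Int :=
  let minusculas : List Char := ['a','b','c','d','e','f','g','h','i','j','k','l','m','n','ñ','o','p','q','r','s','t','u','v','w','x','y','z']
  let mayusculas : List Char := ['A','B','C','D','E','F','G','H','I','J','K','L','M','N','Ñ','O','P','Q','R','S','T','U','V','W','X','Y','Z']
  let numeros : List Char := ['0','1','2','3','4','5','6','7','8','9']
  passwords.foldl (fun arr i =>
    let cs := i.toList
    let st : Int × Int × Int × Int × Int :=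
      cs.foldl (fun st k =>
        if k ∈ minusculas then
          if st.2.1 == 0 then (st.1 + 1, 1, st.2.2.1, st.2.2.2.1, st.2.2.2.2) else st
        else if k ∈ mayusculas then
          if st.2.2.1 == 0 then (st.1 + 1, st.2.1, 1, st.2.2.2.1, st.2.2.2.2) else st
        else if k ∈ numeros then
          if st.2.2.2.1 == 0 then (st.1 + 1, st.2.1, st.2.2.1, 1, st.2.2.2.2) else st
        else
          if st.2.2.2.2 == 0 then (st.1 + 3, st.2.1, st.2.2.1, st.2.2.2.1, 1)
          else (st.1 + 2, st.2.1, st.2.2.1, st.2.2.2.1, st.2.2.2.2))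
        (0, 0, 0, 0, 0)
    let pts : Int :=
      patterns.foldl (fun pts patron =>
        (PySem.List.pyRange 0 (PySem.List.len cs)).foldl (fun pts caracter =>
          ((PySem.List.pyRange caracter (PySem.List.len cs)).foldl
             (fun (sa : List Char × Int) j =>
               (sa.1 ++ [PySem.List.pyGetD cs j ' '], if sa.1 ++ [PySem.List.pyGetD cs j ' '] == patron.toList then sa.2 - 5 else sa.2))
             ([], pts)).2)
          pts)
        st.1
    arr ++ [pts + (cs.length : Int)]) []

-- ===== PORT B =====
def pvStepB (st : Bool × Bool × Bool × Int) (ch : Char) : Bool × Bool × Bool × Int :=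
  if ('a' ≤ ch ∧ ch ≤ 'z') ∨ ch = 'ñ' then (true, st.2.1, st.2.2.1, st.2.2.2)
  else if ('A' ≤ ch ∧ ch ≤ 'Z') ∨ ch = 'Ñ' then (st.1, true, st.2.2.1, st.2.2.2)
  else if '0' ≤ ch ∧ ch ≤ '9' then (st.1, st.2.1, true, st.2.2.2)
  else (st.1, st.2.1, st.2.2.1, st.2.2.2 + 1)

-- Source B's 'while True: idx = pw.find(p, start); …' loop; the first branch is only a
-- totality guard (every call site has start ≤ cs.length, where it never fires)
def pvFindLoop (cs p : List Char) (start : Nat) (score : Int) : Int :=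
  if cs.length < start then score
  else
    let idx := PySem.Chars.findFrom cs p (start : Int)
    if h : idx = -1 then score
    else pvFindLoop cs p (idx.toNat + 1) (score - 5)
termination_by cs.length + 1 - start
decreasing_by
  rename_i hg
  have hs : start ≤ cs.length := by omega
  have hspec := PySem.Chars.findFrom_natCast_spec cs p start hs h
  have _h1 : (start : Int) ≤ PySem.Chars.findFrom cs p (start : Int) := hspec.1
  omega
def calcular_puntos_de_seguridad_alt (patterns : List String) (passwords : List String) : List Int :=
  passwords.foldl (fun res pw =>
    let cs := pw.toList
    let st := cs.foldl pvStepB (false, false, false, 0)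
    let score0 : Int := (if st.1 then 1 else 0) + (if st.2.1 then 1 else 0) + (if st.2.2.1 then 1 else 0)
    let score1 := if 0 < st.2.2.2 then score0 + (2 * st.2.2.2 + 1) else score0
    let score2 := patterns.foldl (fun sc p => if p.toList = [] then sc else pvFindLoop cs p.toList 0 sc) score1
    res ++ [score2 + (cs.length : Int)]) []

-- ===== PRECONDITION & SPEC =====
def Spec_calcular_puntos_de_seguridad (patterns : List String) (passwords : List String) (out : List Int) : Prop := out = calcular_puntos_de_seguridad_alt patterns passwords
instance (patterns : List String) (passwords : List String) (out : List Int) : Decidable (Spec_calcular_puntos_de_seguridad patterns passwords out) := by unfold Spec_calcular_puntos_de_seguridad; infer_instance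

-- ===== CLAIM (what is proved, stated in full; the proofs are below) =====
def Claim_equal_calcular_puntos_de_seguridad : Prop := ∀ (patterns : List String) (passwords : List String), Dom_calcular_puntos_de_seguridad patterns passwords → Spec_calcular_puntos_de_seguridad patterns passwords (calcular_puntos_de_seguridad patterns passwords)

-- ===== LEMMAS AND PROOFS =====

lemma char_eq_of_toNat {k c : Char} (h : k.toNat = c.toNat) : k = c := Char.ext (UInt32.toNat_inj.mp h)
lemma char_le_iff (c k : Char) : (c ≤ k) ↔ c.toNat ≤ k.toNat := by
  rw [Char.le_def, UInt32.le_iff_toNat_le]; rfl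
lemma char_eq_iff (k c : Char) : (k = c) ↔ k.toNat = c.toNat := ⟨fun h => h ▸ rfl, char_eq_of_toNat⟩
lemma mem_minusculas (k : Char) :
    k ∈ (['a','b','c','d','e','f','g','h','i','j','k','l','m','n','ñ','o','p','q','r','s','t','u','v','w','x','y','z'] : List Char)
      ↔ ((97 ≤ k.toNat ∧ k.toNat ≤ 122) ∨ k.toNat = 241) := by
  constructor
  · intro h; fin_cases h <;> simp
  · rintro (⟨h1, h2⟩ | h)
    · rw [← Char.ofNat_toNat k]; set n := k.toNat with hn; interval_cases n <;> decide
    · rw [← Char.ofNat_toNat k, h]; decide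
lemma mem_mayusculas (k : Char) :
    k ∈ (['A','B','C','D','E','F','G','H','I','J','K','L','M','N','Ñ','O','P','Q','R','S','T','U','V','W','X','Y','Z'] : List Char)
      ↔ ((65 ≤ k.toNat ∧ k.toNat ≤ 90) ∨ k.toNat = 209) := by
  constructor
  · intro h; fin_cases h <;> simp
  · rintro (⟨h1, h2⟩ | h)
    · rw [← Char.ofNat_toNat k]; set n := k.toNat with hn; interval_cases n <;> decide
    · rw [← Char.ofNat_toNat k, h]; decide
lemma mem_numeros (k : Char) :
    k ∈ (['0','1','2','3','4','5','6','7','8','9'] : List Char) ↔ (48 ≤ k.toNat ∧ k.toNat ≤ 57) := by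
  constructor
  · intro h; fin_cases h <;> simp
  · rintro ⟨h1, h2⟩
    rw [← Char.ofNat_toNat k]; set n := k.toNat with hn; interval_cases n <;> decide
def pvB2I (b : Bool) : Int := if b then 1 else 0
def pvScoreOf (st : Bool × Bool × Bool × Int) : Int :=
  pvB2I st.1 + pvB2I st.2.1 + pvB2I st.2.2.1 + (if 0 < st.2.2.2 then 2 * st.2.2.2 + 1 else 0)
def pvEnc (st : Bool × Bool × Bool × Int) (base : Int) : Int × Int × Int × Int × Int :=
  (base + pvScoreOf st, pvB2I st.1, pvB2I st.2.1, pvB2I st.2.2.1, if 0 < st.2.2.2 then 1 else 0)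

lemma stepA_enc (c : Char) (st : Bool × Bool × Bool × Int) (base : Int) (h : 0 ≤ st.2.2.2) :
    (fun (st : Int × Int × Int × Int × Int) (k : Char) =>
        if k ∈ (['a','b','c','d','e','f','g','h','i','j','k','l','m','n','ñ','o','p','q','r','s','t','u','v','w','x','y','z'] : List Char) then
          if st.2.1 == 0 then (st.1 + 1, 1, st.2.2.1, st.2.2.2.1, st.2.2.2.2) else st
        else if k ∈ (['A','B','C','D','E','F','G','H','I','J','K','L','M','N','Ñ','O','P','Q','R','S','T','U','V','W','X','Y','Z'] : List Char) then
          if st.2.2.1 == 0 then (st.1 + 1, st.2.1, 1, st.2.2.2.1, st.2.2.2.2) else st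
        else if k ∈ (['0','1','2','3','4','5','6','7','8','9'] : List Char) then
          if st.2.2.2.1 == 0 then (st.1 + 1, st.2.1, st.2.2.1, 1, st.2.2.2.2) else st
        else
          if st.2.2.2.2 == 0 then (st.1 + 3, st.2.1, st.2.2.1, st.2.2.2.1, 1)
          else (st.1 + 2, st.2.1, st.2.2.1, st.2.2.2.1, st.2.2.2.2)) (pvEnc st base) c
      = pvEnc (pvStepB st c) base := by
  obtain ⟨hl, hu, hd, sp⟩ := st
  simp only [pvStepB, mem_minusculas, mem_mayusculas, mem_numeros, char_le_iff, char_eq_iff]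
  norm_num [show 'a'.toNat = 97 from rfl, show 'z'.toNat = 122 from rfl, show 'ñ'.toNat = 241 from rfl, show 'A'.toNat = 65 from rfl, show 'Z'.toNat = 90 from rfl, show 'Ñ'.toNat = 209 from rfl, show '0'.toNat = 48 from rfl, show '9'.toNat = 57 from rfl]
  by_cases h1 : (97 ≤ c.toNat ∧ c.toNat ≤ 122) ∨ c.toNat = 241
  · rw [if_pos h1, if_pos h1]
    cases hl <;> simp [pvEnc, pvScoreOf, pvB2I] <;> ring
  · rw [if_neg h1, if_neg h1]
    by_cases h2 : (65 ≤ c.toNat ∧ c.toNat ≤ 90) ∨ c.toNat = 209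
    · rw [if_pos h2, if_pos h2]
      cases hu <;> simp [pvEnc, pvScoreOf, pvB2I] <;> ring
    · rw [if_neg h2, if_neg h2]
      by_cases h3 : 48 ≤ c.toNat ∧ c.toNat ≤ 57
      · rw [if_pos h3, if_pos h3]
        cases hd <;> simp [pvEnc, pvScoreOf, pvB2I] <;> ring
      · rw [if_neg h3, if_neg h3]
        simp only [pvEnc, pvScoreOf, pvB2I]
        by_cases h4 : (0:Int) < sp
        · simp [h4, show (0:Int) < sp + 1 by omega]
          ring
        · have hsp0 : sp = 0 := le_antisymm (not_lt.mp h4) (by simpa using h)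
          subst hsp0
          norm_num
          ring

lemma pvStepB_nonneg (st : Bool × Bool × Bool × Int) (c : Char) (h : 0 ≤ st.2.2.2) :
    0 ≤ (pvStepB st c).2.2.2 := by
  obtain ⟨hl, hu, hd, sp⟩ := st
  simp only [pvStepB]
  split_ifs <;> simp_all <;> omega

lemma charFold_eq (cs : List Char) : ∀ (st : Bool × Bool × Bool × Int) (base : Int), 0 ≤ st.2.2.2 →
    cs.foldl (fun st k =>
        if k ∈ (['a','b','c','d','e','f','g','h','i','j','k','l','m','n','ñ','o','p','q','r','s','t','u','v','w','x','y','z'] : List Char) then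
          if st.2.1 == 0 then (st.1 + 1, 1, st.2.2.1, st.2.2.2.1, st.2.2.2.2) else st
        else if k ∈ (['A','B','C','D','E','F','G','H','I','J','K','L','M','N','Ñ','O','P','Q','R','S','T','U','V','W','X','Y','Z'] : List Char) then
          if st.2.2.1 == 0 then (st.1 + 1, st.2.1, 1, st.2.2.2.1, st.2.2.2.2) else st
        else if k ∈ (['0','1','2','3','4','5','6','7','8','9'] : List Char) then
          if st.2.2.2.1 == 0 then (st.1 + 1, st.2.1, st.2.2.1, 1, st.2.2.2.2) else st
        else
          if st.2.2.2.2 == 0 then (st.1 + 3, st.2.1, st.2.2.1, st.2.2.2.1, 1)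
          else (st.1 + 2, st.2.1, st.2.2.1, st.2.2.2.1, st.2.2.2.2))
      (pvEnc st base)
    = pvEnc (cs.foldl pvStepB st) base := by
  induction cs with
  | nil => intro st base h; rfl
  | cons c t ih =>
    intro st base h
    simp only [List.foldl_cons]
    have := stepA_enc c st base h
    simp only at this
    rw [this]
    exact ih (pvStepB st c) base (pvStepB_nonneg st c h)


lemma pyRange_zero_len (cs : List Char) :
    PySem.List.pyRange 0 (PySem.List.len cs) = List.map (Nat.cast : Nat → Int) (List.range cs.length) := by
  rw [PySem.List.pyRange_of_pos 0 (PySem.List.len cs) (by norm_num)]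
  simp [PySem.List.len]
  rcases Nat.eq_zero_or_pos cs.length with h | h
  · simp [h]
  · rw [if_pos (by exact_mod_cast h)]

lemma takeCount_eq (t : List Char) : ∀ (p : List Char),
    (List.range t.length).countP (fun m => t.take (m+1) == p)
      = (if p.isPrefixOf t && !p.isEmpty then 1 else 0) := by
  induction t with
  | nil =>
    intro p
    cases p <;> simp [List.isPrefixOf]
  | cons c t' ih =>
    intro p
    rw [List.length_cons, List.range_succ_eq_map]
    rw [List.countP_cons, List.countP_map]
    cases p with
    | nil =>
      simp
    | cons q p' =>
      by_cases hcq : c = q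
      · subst hcq
        cases p' with
        | nil =>
          have h2 : (List.range t'.length).countP ((fun m => List.take (m + 1) (c :: t') == [c]) ∘ Nat.succ) = 0 := by
            rw [List.countP_eq_zero]
            intro m hm
            simp [Function.comp, List.take_succ_cons]
            intro h
            subst h
            simp at hm
          rw [h2]
          simp [List.isPrefixOf]
        | cons r p'' =>
          have : (List.range t'.length).countP ((fun m => List.take (m + 1) (c :: t') == c :: r :: p'') ∘ Nat.succ)
              = (List.range t'.length).countP (fun m => List.take (m + 1) t' == r :: p'') := by
            apply List.countP_congr
            intro m _
            simp [Function.comp, List.take_succ_cons]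
          rw [this, ih (r :: p'')]
          simp [List.isPrefixOf]
      · have h1 : ¬ (List.take 1 (c :: t') == q :: p') = true := by
          simp [List.take_succ_cons]
          intro h; exact absurd h hcq
        have h2 : (List.range t'.length).countP ((fun m => List.take (m + 1) (c :: t') == q :: p') ∘ Nat.succ) = 0 := by
          rw [List.countP_eq_zero]
          intro m _
          simp [Function.comp, List.take_succ_cons, hcq]
        simp only [Function.comp] at h1 h2 ⊢
        rw [if_neg h1, h2]
        simp [List.isPrefixOf_iff_prefix, List.cons_prefix_cons]
        intro h; exact absurd h.symm hcq

lemma innerFold_eq (t : List Char) : ∀ (p pre : List Char) (acc : Int),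
    (t.foldl (fun (sa : List Char × Int) c =>
        (sa.1 ++ [c], if sa.1 ++ [c] == p then sa.2 - 5 else sa.2)) (pre, acc)).2
      = acc - 5 * (((List.range t.length).countP (fun m => pre ++ t.take (m+1) == p)) : Int) := by
  induction t with
  | nil => intro p pre acc; simp
  | cons c t' ih =>
    intro p pre acc
    simp only [List.foldl_cons]
    rw [ih p (pre ++ [c]) (if pre ++ [c] == p then acc - 5 else acc)]
    rw [List.length_cons, List.range_succ_eq_map, List.countP_cons, List.countP_map]
    have hc : (List.range t'.length).countP ((fun m => pre ++ List.take (m + 1) (c :: t') == p) ∘ Nat.succ)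
        = (List.range t'.length).countP (fun m => (pre ++ [c]) ++ List.take (m + 1) t' == p) := by
      apply List.countP_congr
      intro m _
      simp [Function.comp, List.take_succ_cons]
    rw [hc]
    by_cases hm : pre ++ [c] == p
    · rw [if_pos hm]
      simp only [List.take_succ_cons, List.take_zero]
      rw [if_pos (by simpa using hm)]
      push_cast
      ring
    · rw [if_neg hm]
      simp only [List.take_succ_cons, List.take_zero]
      rw [if_neg (by simpa using hm)]
      push_cast
      ring

lemma countP_ge_split (P : Nat → Bool) (a i : Nat) : ∀ (n : Nat), i < n → a ≤ i → P i = true →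
    (∀ j, a ≤ j → j < i → P j = false) →
    (List.range n).countP (fun j => decide (a ≤ j) && P j)
      = 1 + (List.range n).countP (fun j => decide (i + 1 ≤ j) && P j) := by
  intro n
  induction n with
  | zero => intro h; omega
  | succ n ihn =>
    intro hin hai hPi hmin
    rw [List.range_succ, List.countP_append, List.countP_append]
    simp only [List.countP_cons, List.countP_nil]
    rcases Nat.lt_or_ge i n with h | h
    · rw [ihn h hai hPi hmin]
      have e1 : (decide (a ≤ n) && P n) = (decide (i + 1 ≤ n) && P n) := by
        have : a ≤ n := by omega
        have : i + 1 ≤ n := by omega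
        simp_all
      rw [e1]
      ring
    · have hieq : i = n := by omega
      subst hieq
      have c1 : (List.range i).countP (fun j => decide (a ≤ j) && P j) = 0 := by
        rw [List.countP_eq_zero]
        intro j hj
        rw [List.mem_range] at hj
        by_cases haj : a ≤ j
        · simp [hmin j haj hj]
        · simp [haj]
      have c2 : (List.range i).countP (fun j => decide (i + 1 ≤ j) && P j) = 0 := by
        rw [List.countP_eq_zero]
        intro j hj
        rw [List.mem_range] at hj
        simp [show ¬ (i + 1 ≤ j) by omega]
      rw [c1, c2]
      simp [hPi, hai, show ¬ (i + 1 ≤ i) by omega]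

def pvOcc (p cs : List Char) (a : Nat) : Nat :=
  (List.range cs.length).countP (fun j => decide (a ≤ j) && p.isPrefixOf (cs.drop j))

lemma pvFindLoop_eq (cs p : List Char) (hp : p ≠ []) : ∀ (start : Nat) (score : Int), start ≤ cs.length →
    pvFindLoop cs p start score = score - 5 * (pvOcc p cs start : Int) := by
  intro start
  induction hn : cs.length + 1 - start using Nat.strong_induction_on generalizing start with
  | _ n ihn =>
  intro score hstart
  rw [pvFindLoop]
  rw [if_neg (by omega)]
  by_cases hidx : PySem.Chars.findFrom cs p (start : Int) = -1
  · rw [dif_pos hidx]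
    have hocc : pvOcc p cs start = 0 := by
      rw [pvOcc, List.countP_eq_zero]
      intro j hj
      rw [List.mem_range] at hj
      by_cases haj : start ≤ j
      · simp only [haj, decide_true, Bool.true_and]
        intro hpre
        rw [List.isPrefixOf_iff_prefix] at hpre
        have hinf : p <:+: cs.drop start := by
          obtain ⟨t2, ht⟩ := hpre
          refine ⟨(cs.drop start).take (j - start), t2, ?_⟩
          rw [List.append_assoc, ht,
            show List.drop j cs = List.drop (j - start) (List.drop start cs) by
              rw [List.drop_drop]; congr 1; omega,
            List.take_append_drop]
        rw [PySem.Chars.findFrom_natCast_eq_neg_one_iff cs p start hstart] at hidx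
        exact hidx hinf
      · simp [haj]
    rw [hocc]
    simp
  · rw [dif_neg hidx]
    have hspec := PySem.Chars.findFrom_natCast_spec cs p start hstart hidx
    set I := (PySem.Chars.findFrom cs p (start : Int)).toNat with hI
    have hsI : start ≤ I := by
      have := hspec.1
      omega
    have hpre : p <+: cs.drop I := hspec.2.1
    have hIlt : I < cs.length := by
      by_contra hc
      have : cs.drop I = [] := List.drop_eq_nil_of_le (by omega)
      rw [this] at hpre
      exact hp (List.prefix_nil.mp hpre)
    have hocc : pvOcc p cs start = 1 + pvOcc p cs (I + 1) := by
      rw [pvOcc, pvOcc]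
      apply countP_ge_split _ _ _ _ hIlt hsI
      · rw [List.isPrefixOf_iff_prefix]; exact hpre
      · intro j haj hji
        have := hspec.2.2 j haj hji
        rw [← Bool.not_eq_true, List.isPrefixOf_iff_prefix]
        exact this
    rw [ihn (cs.length + 1 - (I + 1)) (by omega) (I + 1) rfl (score - 5) (by omega), hocc]
    push_cast
    ring

lemma foldl_sub_eq {α : Type} (l : List α) (h : α → Int) : ∀ (init : Int),
    l.foldl (fun acc x => acc - h x) init = init - (l.map h).sum := by
  induction l with
  | nil => simp
  | cons x t ih => intro init; simp [ih]; ring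

lemma sum_map_ite5 (Q : Nat → Bool) : ∀ (l : List Nat),
    (l.map (fun j => if Q j then (5:Int) else 0)).sum = 5 * (l.countP Q : Int) := by
  intro l
  induction l with
  | nil => simp
  | cons x t ih =>
    simp only [List.map_cons, List.sum_cons, List.countP_cons, ih]
    by_cases h : Q x <;> simp [h] <;> push_cast <;> ring

lemma patternFold_eq (cs : List Char) (patterns : List String) : ∀ (init : Int),
    patterns.foldl (fun pts patron =>
        (PySem.List.pyRange 0 (PySem.List.len cs)).foldl (fun pts caracter =>
          ((PySem.List.pyRange caracter (PySem.List.len cs)).foldl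
             (fun (sa : List Char × Int) j =>
               (sa.1 ++ [PySem.List.pyGetD cs j ' '], if sa.1 ++ [PySem.List.pyGetD cs j ' '] == patron.toList then sa.2 - 5 else sa.2))
             ([], pts)).2)
          pts) init
      = patterns.foldl (fun sc p => if p.toList = [] then sc else pvFindLoop cs p.toList 0 sc) init := by
  intro init
  apply PySem.List.foldl_congr_mem
  intro pts p _
  -- A's scan for one pattern
  have hA : (PySem.List.pyRange 0 (PySem.List.len cs)).foldl (fun pts caracter =>
          ((PySem.List.pyRange caracter (PySem.List.len cs)).foldl
             (fun (sa : List Char × Int) j =>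
               (sa.1 ++ [PySem.List.pyGetD cs j ' '], if sa.1 ++ [PySem.List.pyGetD cs j ' '] == p.toList then sa.2 - 5 else sa.2))
             ([], pts)).2)
          pts
      = pts - 5 * ((List.range cs.length).countP (fun j => p.toList.isPrefixOf (cs.drop j) && !p.toList.isEmpty) : Int) := by
    rw [pyRange_zero_len, List.foldl_map]
    have hbody : ∀ (acc : Int), ∀ j ∈ List.range cs.length,
        ((PySem.List.pyRange ((j : Nat) : Int) (PySem.List.len cs)).foldl
             (fun (sa : List Char × Int) x =>
               (sa.1 ++ [PySem.List.pyGetD cs x ' '], if sa.1 ++ [PySem.List.pyGetD cs x ' '] == p.toList then sa.2 - 5 else sa.2))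
             ([], acc)).2
        = acc - (if p.toList.isPrefixOf (cs.drop j) && !p.toList.isEmpty then (5:Int) else 0) := by
      intro acc j hj
      rw [PySem.List.foldl_pyRange_pyGetD cs ' '
        (fun (sa : List Char × Int) c => (sa.1 ++ [c], if sa.1 ++ [c] == p.toList then sa.2 - 5 else sa.2))
        ([], acc) (by positivity)]
      rw [Int.toNat_natCast]
      rw [innerFold_eq (cs.drop j) p.toList [] acc]
      simp only [List.nil_append]
      rw [takeCount_eq (cs.drop j) p.toList]
      by_cases hb : p.toList.isPrefixOf (cs.drop j) && !p.toList.isEmpty <;> simp [hb]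
    refine (PySem.List.foldl_congr_mem _ _
        (fun acc j => acc - (if p.toList.isPrefixOf (cs.drop j) && !p.toList.isEmpty then (5:Int) else 0)) pts
        (fun acc j hj => hbody acc j hj)).trans ?_
    rw [foldl_sub_eq, sum_map_ite5]
  rw [hA]
  by_cases hpn : p.toList = []
  · simp [hpn]
  · rw [if_neg hpn]
    rw [pvFindLoop_eq cs p.toList hpn 0 pts (by omega)]
    have hocc : (List.range cs.length).countP (fun j => p.toList.isPrefixOf (List.drop j cs) && !p.toList.isEmpty)
        = pvOcc p.toList cs 0 := by
      rw [pvOcc]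
      apply List.countP_congr
      intro j _
      simp [hpn, List.isEmpty_iff]
    rw [hocc]

-- ===== VERDICT (by name: the statement is the Claim_ definition above) =====
theorem calcular_puntos_de_seguridad_spec : Claim_equal_calcular_puntos_de_seguridad := by
  intro patterns passwords _
  unfold Spec_calcular_puntos_de_seguridad
  unfold calcular_puntos_de_seguridad calcular_puntos_de_seguridad_alt
  apply PySem.List.foldl_congr_mem
  intro acc pw _
  simp only []
  congr 1
  congr 1
  have hch := charFold_eq pw.toList (false, false, false, 0) 0 (le_refl 0)
  simp only at hch
  rw [show ((0, 0, 0, 0, 0) : Int × Int × Int × Int × Int) = pvEnc (false, false, false, 0) 0 from rfl]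
  rw [hch]
  rw [patternFold_eq]
  congr 1
  obtain ⟨hl, hu, hd, sp⟩ := pw.toList.foldl pvStepB (false, false, false, 0)
  simp only [pvEnc, pvScoreOf, pvB2I]
  by_cases h4 : (0 : Int) < sp <;> simp [h4] <;> ring
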